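-- pv_equiv track=rewrite | github.com/fanmeanthong/CORE_MEBLOCK | Lib/ultrasonic.py | _resolve_pin_id
-- ===== SOURCE A (Python) =====
-- def _normalize_key(k: str) -> str:
--     # Chuẩn hóa key pin cho lookup (không phân biệt hoa thường, bỏ khoảng trắng)
--     return str(k).strip().replace(" ", "").upper()
--
-- def _resolve_pin_id(spec, pinmap=None):
--     """
--     Chấp nhận:
--       - int (vd 2) → dùng trực tiếp
--       - '2' → 2
--       - 'GPIO2', 'IO2', 'P2' → 2
--       - String key có trong pinmap (vd 'TRIG', 'ECHO') → ánh xạ qua pinmap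
--     """
--     if isinstance(spec, int):
--         return spec
--
--     if pinmap:
--         k = _normalize_key(spec)
--         # pinmap có thể đặt key tùy ý: 'TRIG', 'ECHO', 'D2', ...
--         # hoặc dạng 'GPIO2' -> 2
--         if k in { _normalize_key(x) for x in pinmap.keys() }:
--             # tìm key khớp (không phân biệt hoa thường)
--             for mk, mv in pinmap.items():
--                 if _normalize_key(mk) == k:
--                     return int(mv)
--
--     s = str(spec).strip().upper()
--     # Số nguyên dạng chuỗi
--     if s.isdigit():
--         return int(s)
--
--     # Các pattern phổ biến: GPIO2, IO2, P2
--     for prefix in ("GPIO", "IO", "P"):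
--         if s.startswith(prefix) and s[len(prefix):].isdigit():
--             return int(s[len(prefix):])
--
--     raise ValueError("Không xác định được chân từ spec={!r}. Hãy truyền int/\"GPIOx\" hoặc cung cấp pinmap.".format(spec))
-- ===== SOURCE B (Python) =====
-- def _normalize_key(k: str) -> str:
--     return str(k).strip().replace(" ", "").upper()
--
-- def _resolve_pin_id(spec, pinmap=None):
--     if isinstance(spec, int):
--         return spec
--
--     if pinmap:
--         # positional lookup: parallel list of normalized keys, index into the values
--         keys = [_normalize_key(mk) for mk in pinmap.keys()]
--         k = _normalize_key(spec)
--         if k in keys: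
--             return int(list(pinmap.values())[keys.index(k)])
--
--     s = str(spec).strip().upper()
--     # split s at the start of its longest all-digit suffix, scanning from the right;
--     # accept iff the suffix is nonempty and the head is empty or a known pin prefix
--     i = len(s)
--     while i > 0 and s[i-1].isdigit():
--         i -= 1
--     if i < len(s) and s[:i] in ("", "GPIO", "IO", "P"):
--         return int(s[i:])
--
--     raise ValueError("Không xác định được chân từ spec={!r}. Hãy truyền int/\"GPIOx\" hoặc cung cấp pinmap.".format(spec))
-- ===== Notes on version B (the rewrite author's own statement) =====
-- stated objective: alternative
-- what changed: B resolves the pinmap by one positional lookup (a parallel list of normalized keys, keys.index into the values list) instead of building a membership set and then rescanning the items, and parses the spec by scanning from the RIGHT for the longest all-digit suffix and checking that the remaining head is empty or one of the known prefixes, instead of a whole-string digit test followed by a loop of startswith/isdigit prefix trials.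
import Mathlib
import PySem

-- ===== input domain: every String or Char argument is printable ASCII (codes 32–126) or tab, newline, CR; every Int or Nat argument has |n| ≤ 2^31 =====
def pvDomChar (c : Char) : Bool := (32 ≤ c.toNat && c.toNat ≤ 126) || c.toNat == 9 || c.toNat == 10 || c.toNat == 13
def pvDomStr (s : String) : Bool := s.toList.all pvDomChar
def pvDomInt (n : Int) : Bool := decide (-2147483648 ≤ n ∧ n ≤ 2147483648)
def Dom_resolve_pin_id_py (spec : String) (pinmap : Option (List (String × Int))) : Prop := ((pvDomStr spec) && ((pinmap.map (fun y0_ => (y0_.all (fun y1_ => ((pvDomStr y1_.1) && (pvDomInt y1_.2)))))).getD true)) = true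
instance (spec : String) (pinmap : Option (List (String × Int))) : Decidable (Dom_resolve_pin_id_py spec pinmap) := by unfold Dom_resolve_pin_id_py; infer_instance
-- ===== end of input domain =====

-- B resolves the pinmap positionally (normalized-key list + keys.index into the values) and parses
-- the spec by splitting off the longest all-digit suffix from the right and checking the head
-- against the allowed prefixes, instead of A's set+rescan and prefix-trial loop. Objective: alternative.


-- _normalize_key(k) = str(k).strip().replace(" ", "").upper()  (shared Python helper of A and B)
def pvNormKey (k : List Char) : List Char :=
  PySem.Chars.upper (PySem.Chars.replace (PySem.Chars.strip k) [' '] [])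

-- ===== PORT A =====
-- the for-loop over pinmap.items(): first mk with _normalize_key(mk) == k → int(mv)
def pvFindA (items : List (String × Int)) (k : List Char) : Option Int :=
  match items with
  | [] => none
  | (mk, mv) :: rest => if pvNormKey mk.toList = k then some mv else pvFindA rest k

-- the for-loop over ("GPIO", "IO", "P") (string literals written as char lists):
-- s.startswith(prefix) and s[len(prefix):].isdigit()
def pvPrefixLoopA (s : List Char) (prefixes : List (List Char)) : Int :=
  match prefixes with
  | [] => 0  -- raise ValueError — outside Pre_
  | p :: rest =>
      if PySem.Chars.startswith s p && PySem.Chars.strIsdigit (s.drop p.length) then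
        (PySem.Int.ofChars? (s.drop p.length)).getD 0
      else pvPrefixLoopA s rest

def resolve_pin_id_py (spec : String) (pinmap : Option (List (String × Int))) : Int :=
  -- isinstance(spec, int) branch: spec is a str here, never taken
  let mapRes : Option Int :=
    match pinmap with
    | none => none
    | some l =>
      if l.isEmpty then none  -- `if pinmap:` falsy for an empty dict
      else
        let d := PySem.Dict.ofList l
        let k := pvNormKey spec.toList
        if (PySem.Set.ofList (d.items.map (fun p => pvNormKey p.1.toList))).contains k then
          pvFindA d.items k
        else none
  match mapRes with
  | some v => v
  | none =>
    let s := PySem.Chars.upper (PySem.Chars.strip spec.toList)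
    if PySem.Chars.strIsdigit s then (PySem.Int.ofChars? s).getD 0
    else pvPrefixLoopA s [['G','P','I','O'], ['I','O'], ['P']]

-- ===== PORT B =====
-- keys = [_normalize_key(mk) for mk in pinmap.keys()]; if k in keys: int(list(pinmap.values())[keys.index(k)])
def pvFindB (items : List (String × Int)) (k : List Char) : Option Int :=
  match PySem.List.index? (items.map (fun p => pvNormKey p.1.toList)) k with
  | some pos => some ((items.map Prod.snd).getD pos 0)  -- pos in range by construction
  | none => none

-- while i > 0 and s[i-1].isdigit(): i -= 1   (start index of the longest all-digit suffix)
def pvDigitStart (s : List Char) : Nat → Nat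
  | 0 => 0
  | j+1 => if PySem.Chars.isdigit (s.getD j ' ') then pvDigitStart s j else j+1

def resolve_pin_id_py_alt (spec : String) (pinmap : Option (List (String × Int))) : Int :=
  let mapRes : Option Int :=
    match pinmap with
    | none => none
    | some l =>
      if l.isEmpty then none
      else pvFindB (PySem.Dict.ofList l).items (pvNormKey spec.toList)
  match mapRes with
  | some v => v
  | none =>
    let s := PySem.Chars.upper (PySem.Chars.strip spec.toList)
    let i := pvDigitStart s s.length
    if i < s.length ∧ (s.take i = [] ∨ s.take i = ['G','P','I','O'] ∨ s.take i = ['I','O'] ∨ s.take i = ['P']) then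
      (PySem.Int.ofChars? (s.drop i)).getD 0
    else 0  -- raise ValueError — outside Pre_

-- ===== PRECONDITION & SPEC =====
-- Pre_ excludes exactly the inputs where A raises ValueError: no pinmap key matches (after
-- normalization) and the stripped/uppercased spec is neither a digit string nor prefix+digits.
def Pre_resolve_pin_id_py (spec : String) (pinmap : Option (List (String × Int))) : Prop :=
  (pinmap.getD [] ≠ [] ∧
    pvNormKey spec.toList ∈ (pinmap.getD []).map (fun p => pvNormKey p.1.toList))
  ∨ PySem.Chars.strIsdigit (PySem.Chars.upper (PySem.Chars.strip spec.toList)) = true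
  ∨ (PySem.Chars.startswith (PySem.Chars.upper (PySem.Chars.strip spec.toList)) ['G','P','I','O'] = true
      ∧ PySem.Chars.strIsdigit ((PySem.Chars.upper (PySem.Chars.strip spec.toList)).drop 4) = true)
  ∨ (PySem.Chars.startswith (PySem.Chars.upper (PySem.Chars.strip spec.toList)) ['I','O'] = true
      ∧ PySem.Chars.strIsdigit ((PySem.Chars.upper (PySem.Chars.strip spec.toList)).drop 2) = true)
  ∨ (PySem.Chars.startswith (PySem.Chars.upper (PySem.Chars.strip spec.toList)) ['P'] = true
      ∧ PySem.Chars.strIsdigit ((PySem.Chars.upper (PySem.Chars.strip spec.toList)).drop 1) = true)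

instance (spec : String) (pinmap : Option (List (String × Int))) : Decidable (Pre_resolve_pin_id_py spec pinmap) := by
  unfold Pre_resolve_pin_id_py; infer_instance

def pvWitness_resolve_pin_id_py : String × (Option (List (String × Int))) :=
  ("GPIO2", some [("TRIG", 5)])

def Spec_resolve_pin_id_py (spec : String) (pinmap : Option (List (String × Int))) (out : Int) : Prop := out = resolve_pin_id_py_alt spec pinmap
instance (spec : String) (pinmap : Option (List (String × Int))) (out : Int) : Decidable (Spec_resolve_pin_id_py spec pinmap out) := by unfold Spec_resolve_pin_id_py; infer_instance

-- ===== CLAIM (what is proved, stated in full; the proofs are below) =====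
def Claim_equal_resolve_pin_id_py : Prop := ∀ (spec : String) (pinmap : Option (List (String × Int))), Dom_resolve_pin_id_py spec pinmap → Pre_resolve_pin_id_py spec pinmap → Spec_resolve_pin_id_py spec pinmap (resolve_pin_id_py spec pinmap)

-- ===== LEMMAS AND PROOFS =====

-- B's positional lookup computes A's first-match loop
lemma findB_eq_findA (items : List (String × Int)) (k : List Char) :
    pvFindB items k = pvFindA items k := by
  induction items with
  | nil => simp [pvFindB, pvFindA, PySem.List.index?]
  | cons p rest ih =>
    unfold pvFindB pvFindA
    by_cases h : pvNormKey p.1.toList = k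
    · simp only [List.map_cons, h, PySem.List.index?_cons_self]
      simp
    · rw [List.map_cons, PySem.List.index?_cons_of_ne _ h, if_neg h, ← ih]
      unfold pvFindB
      cases PySem.List.index? (rest.map (fun p => pvNormKey p.1.toList)) k <;> simp

-- A's set-membership test succeeds iff A's loop finds a match
lemma pvFindA_isSome_iff (items : List (String × Int)) (k : List Char) :
    (pvFindA items k).isSome = true ↔ k ∈ items.map (fun p => pvNormKey p.1.toList) := by
  induction items with
  | nil => simp [pvFindA]
  | cons p rest ih =>
    simp only [pvFindA, List.map_cons, List.mem_cons]
    by_cases h : pvNormKey p.1.toList = k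
    · simp [h]
    · simp only [if_neg h, ih]
      constructor
      · exact Or.inr
      · rintro (hk | hk)
        · exact absurd hk.symm h
        · exact hk

lemma ds_le (s : List Char) (n : Nat) : pvDigitStart s n ≤ n := by
  induction n with
  | zero => simp [pvDigitStart]
  | succ j ih =>
    unfold pvDigitStart
    split
    · omega
    · omega

lemma ds_digits (s : List Char) (n : Nat) :
    ∀ j, pvDigitStart s n ≤ j → j < n → PySem.Chars.isdigit (s.getD j ' ') = true := by
  induction n with
  | zero => omega
  | succ m ih =>
    intro j h1 h2
    unfold pvDigitStart at h1
    by_cases hd : PySem.Chars.isdigit (s.getD m ' ') = true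
    · rw [if_pos hd] at h1
      by_cases hj : j = m
      · subst hj; exact hd
      · exact ih j h1 (by omega)
    · rw [if_neg hd] at h1
      omega

lemma ds_spec (s : List Char) (i : Nat)
    (hstop : i = 0 ∨ PySem.Chars.isdigit (s.getD (i-1) ' ') = false) :
    ∀ n, i ≤ n → (∀ j, i ≤ j → j < n → PySem.Chars.isdigit (s.getD j ' ') = true) →
      pvDigitStart s n = i := by
  intro n
  induction n with
  | zero => intro h _; unfold pvDigitStart; omega
  | succ m ih =>
    intro hin hall
    by_cases him : i = m + 1
    · subst him
      have hst : PySem.Chars.isdigit (s.getD m ' ') = false := by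
        rcases hstop with h0 | h0
        · omega
        · simpa using h0
      unfold pvDigitStart
      rw [if_neg (by simp only [hst]; exact Bool.false_ne_true)]
    · have hle : i ≤ m := by omega
      have hd : PySem.Chars.isdigit (s.getD m ' ') = true := hall m hle (by omega)
      unfold pvDigitStart
      rw [if_pos hd]
      exact ih hle (fun j hj hjm => hall j hj (by omega))

-- strIsdigit of a suffix, phrased on positions of the whole string
lemma strIsdigit_drop_iff (s : List Char) (i : Nat) (hi : i ≤ s.length) :
    PySem.Chars.strIsdigit (s.drop i) = true ↔
      i < s.length ∧ ∀ j, i ≤ j → j < s.length → PySem.Chars.isdigit (s.getD j ' ') = true := by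
  have hg : ∀ m : Nat, (s.drop i).getD m ' ' = s.getD (i + m) ' ' := by
    intro m; simp [List.getD_eq_getElem?_getD, List.getElem?_drop]
  constructor
  · intro h
    simp only [PySem.Chars.strIsdigit, Bool.and_eq_true, Bool.not_eq_true',
      List.isEmpty_eq_false_iff, List.all_eq_true] at h
    obtain ⟨hne, hall⟩ := h
    constructor
    · by_contra hlt
      exact (List.ne_nil_iff_exists_cons.mp hne).elim (fun a ⟨t, ht⟩ => by
        have : s.drop i = [] := List.drop_eq_nil_of_le (by omega)
        simp [this] at ht)
    · intro j hij hjl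
      have hm : j - i < (s.drop i).length := by simp [List.length_drop]; omega
      have hmem : (s.drop i).getD (j - i) ' ' ∈ s.drop i := by
        rw [List.getD_eq_getElem _ _ hm]; exact List.getElem_mem hm
      have := hall _ hmem
      rw [hg (j - i)] at this
      rwa [Nat.add_sub_cancel' hij] at this
  · rintro ⟨hlt, hall⟩
    simp only [PySem.Chars.strIsdigit, Bool.and_eq_true, Bool.not_eq_true',
      List.isEmpty_eq_false_iff, List.all_eq_true]
    refine ⟨by simp [List.drop_eq_nil_iff]; omega, ?_⟩
    intro c hc
    obtain ⟨m, hm, rfl⟩ := List.mem_iff_getElem.mp hc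
    rw [← List.getD_eq_getElem _ ' ' hm, hg m]
    exact hall (i + m) (by omega) (by simp [List.length_drop] at hm; omega)

-- the two tails agree on every string
lemma tail_eq (s : List Char) :
    (if PySem.Chars.strIsdigit s then (PySem.Int.ofChars? s).getD 0
     else pvPrefixLoopA s [['G','P','I','O'], ['I','O'], ['P']])
  = (if pvDigitStart s s.length < s.length ∧
        (s.take (pvDigitStart s s.length) = [] ∨ s.take (pvDigitStart s s.length) = ['G','P','I','O'] ∨
         s.take (pvDigitStart s s.length) = ['I','O'] ∨ s.take (pvDigitStart s s.length) = ['P']) then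
       (PySem.Int.ofChars? (s.drop (pvDigitStart s s.length))).getD 0
     else 0) := by
  by_cases hd : PySem.Chars.strIsdigit s = true
  · -- whole string digits ⇒ the suffix scan reaches 0
    have hch := (strIsdigit_drop_iff s 0 (Nat.zero_le _)).mp (by simpa using hd)
    have h0 : pvDigitStart s s.length = 0 :=
      ds_spec s 0 (Or.inl rfl) s.length (Nat.zero_le _) (fun j _ hj => hch.2 j (Nat.zero_le _) hj)
    rw [if_pos hd, h0, if_pos ⟨hch.1, Or.inl (List.take_zero)⟩, List.drop_zero]
  · rw [if_neg hd]
    rw [Bool.not_eq_true] at hd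
    -- helper facts for each prefix case
    have hcase : ∀ (p : List Char), p ≠ [] →
        PySem.Chars.isdigit (p.getD (p.length - 1) ' ') = false →
        PySem.Chars.startswith s p = true →
        PySem.Chars.strIsdigit (s.drop p.length) = true →
        pvDigitStart s s.length = p.length ∧ s.take p.length = p ∧ p.length < s.length := by
      intro p hpne hplast hstart hdig
      have hpre : p <+: s := (PySem.Chars.startswith_iff s p).mp hstart
      have hple : p.length ≤ s.length := hpre.length_le
      have hdi := (strIsdigit_drop_iff s p.length hple).mp hdig
      have htake : s.take p.length = p := (List.prefix_iff_eq_take.mp hpre).symm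
      have hlast : s.getD (p.length - 1) ' ' = p.getD (p.length - 1) ' ' := by
        have hm : p.length - 1 < p.length := by
          cases p with | nil => exact absurd rfl hpne | cons a t => simp
        obtain ⟨t, ht⟩ := hpre
        subst ht
        rw [List.getD_eq_getElem _ ' ' (by simp; omega), List.getD_eq_getElem _ ' ' hm]
        exact List.getElem_append_left hm
      refine ⟨?_, htake, hdi.1⟩
      apply ds_spec s p.length (Or.inr (by rw [hlast]; exact hplast)) s.length hple
      exact fun j hj hjl => hdi.2 j hj hjl
    have l4 : (['G','P','I','O'] : List Char).length = 4 := rfl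
    have l2 : (['I','O'] : List Char).length = 2 := rfl
    have l1 : (['P'] : List Char).length = 1 := rfl
    simp only [pvPrefixLoopA, l4, l2, l1]
    by_cases c1 : (PySem.Chars.startswith s ['G','P','I','O'] && PySem.Chars.strIsdigit (s.drop 4)) = true
    · rw [if_pos c1]
      simp only [Bool.and_eq_true] at c1
      obtain ⟨h1, h2⟩ := c1
      obtain ⟨hds, htk, hlt⟩ := hcase ['G','P','I','O'] (by simp) (by decide) h1 (by rw [l4]; exact h2)
      rw [l4] at hds htk hlt
      rw [hds, if_pos ⟨hlt, Or.inr (Or.inl htk)⟩]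
    · rw [if_neg c1]
      by_cases c2 : (PySem.Chars.startswith s ['I','O'] && PySem.Chars.strIsdigit (s.drop 2)) = true
      · rw [if_pos c2]
        simp only [Bool.and_eq_true] at c2
        obtain ⟨h1, h2⟩ := c2
        obtain ⟨hds, htk, hlt⟩ := hcase ['I','O'] (by simp) (by decide) h1 (by rw [l2]; exact h2)
        rw [l2] at hds htk hlt
        rw [hds, if_pos ⟨hlt, Or.inr (Or.inr (Or.inl htk))⟩]
      · rw [if_neg c2]
        by_cases c3 : (PySem.Chars.startswith s ['P'] && PySem.Chars.strIsdigit (s.drop 1)) = true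
        · rw [if_pos c3]
          simp only [Bool.and_eq_true] at c3
          obtain ⟨h1, h2⟩ := c3
          obtain ⟨hds, htk, hlt⟩ := hcase ['P'] (by simp) (by decide) h1 (by rw [l1]; exact h2)
          rw [l1] at hds htk hlt
          rw [hds, if_pos ⟨hlt, Or.inr (Or.inr (Or.inr htk))⟩]
        · -- nothing matched in A ⇒ B's head test cannot succeed either
          rw [if_neg c3]
          rw [if_neg ?_]
          rintro ⟨hlt, hmem⟩
          have hile : pvDigitStart s s.length ≤ s.length := ds_le s s.length
          have hdig : PySem.Chars.strIsdigit (s.drop (pvDigitStart s s.length)) = true := by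
            rw [strIsdigit_drop_iff s _ hile]
            exact ⟨hlt, fun j hj hjl => ds_digits s s.length j hj hjl⟩
          have hlentake : (s.take (pvDigitStart s s.length)).length = pvDigitStart s s.length := by
            simp [List.length_take]; omega
          rcases hmem with h | h | h | h
          · -- empty head: the whole string is digits, contradicting hd
            have hi0 : pvDigitStart s s.length = 0 := by rw [h] at hlentake; simpa using hlentake.symm
            rw [hi0, List.drop_zero] at hdig
            simp [hdig] at hd
          · have hi : pvDigitStart s s.length = 4 := by rw [h] at hlentake; simpa using hlentake.symm
            have hstart : PySem.Chars.startswith s ['G','P','I','O'] = true := by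
              rw [PySem.Chars.startswith_iff, List.prefix_iff_eq_take, l4, ← hi]; exact h.symm
            rw [hi] at hdig
            simp [hstart, hdig] at c1
          · have hi : pvDigitStart s s.length = 2 := by rw [h] at hlentake; simpa using hlentake.symm
            have hstart : PySem.Chars.startswith s ['I','O'] = true := by
              rw [PySem.Chars.startswith_iff, List.prefix_iff_eq_take, l2, ← hi]; exact h.symm
            rw [hi] at hdig
            simp [hstart, hdig] at c2
          · have hi : pvDigitStart s s.length = 1 := by rw [h] at hlentake; simpa using hlentake.symm
            have hstart : PySem.Chars.startswith s ['P'] = true := by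
              rw [PySem.Chars.startswith_iff, List.prefix_iff_eq_take, l1, ← hi]; exact h.symm
            rw [hi, List.drop_one] at hdig
            simp [hstart, hdig] at c3

-- the two ports agree on EVERY input (A's raise path is the shared 0 sentinel)
lemma ports_agree (spec : String) (pinmap : Option (List (String × Int))) :
    resolve_pin_id_py spec pinmap = resolve_pin_id_py_alt spec pinmap := by
  unfold resolve_pin_id_py resolve_pin_id_py_alt
  have hmap : ∀ l : List (String × Int),
      (if ((PySem.Set.ofList ((PySem.Dict.ofList l).items.map (fun p => pvNormKey p.1.toList))).contains
            (pvNormKey spec.toList)) then pvFindA (PySem.Dict.ofList l).items (pvNormKey spec.toList)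
       else none)
        = pvFindB (PySem.Dict.ofList l).items (pvNormKey spec.toList) := by
    intro l
    rw [findB_eq_findA]
    by_cases hc : (PySem.Set.ofList ((PySem.Dict.ofList l).items.map (fun p => pvNormKey p.1.toList))).contains
        (pvNormKey spec.toList) = true
    · rw [if_pos hc]
    · rw [if_neg hc]
      have hnm : pvNormKey spec.toList ∉ (PySem.Dict.ofList l).items.map (fun p => pvNormKey p.1.toList) := by
        intro hx
        exact hc ((PySem.Set.contains_iff _ _).mpr ((PySem.Set.mem_ofList _ _).mpr hx))
      cases hfa : pvFindA (PySem.Dict.ofList l).items (pvNormKey spec.toList) with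
      | none => rfl
      | some v =>
        exact absurd ((pvFindA_isSome_iff _ _).mp (by rw [hfa]; rfl)) hnm
  cases pinmap with
  | none => simpa using tail_eq (PySem.Chars.upper (PySem.Chars.strip spec.toList))
  | some l =>
    by_cases he : l.isEmpty
    · simp only [he, if_true]
      simpa using tail_eq (PySem.Chars.upper (PySem.Chars.strip spec.toList))
    · simp only [he, if_false, Bool.false_eq_true, hmap l]
      cases pvFindB (PySem.Dict.ofList l).items (pvNormKey spec.toList) with
      | none => simpa using tail_eq (PySem.Chars.upper (PySem.Chars.strip spec.toList))
      | some v => rfl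

-- ===== VERDICT (by name: the statement is the Claim_ definition above) =====
theorem resolve_pin_id_py_spec : Claim_equal_resolve_pin_id_py := by
  intro spec pinmap _ _
  unfold Spec_resolve_pin_id_py
  exact ports_agree spec pinmap
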